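-- pv_equiv track=rewrite | github.com/Coders-HQ/discord-bot | micro/classes/resources.py | prepare_pagination
-- ===== SOURCE A (Python) =====
-- from math import ceil
--
-- def prepare_pagination(to_paginate: dict) -> list[list]:
--     """To paginate the given dictionary to set of pages and contents"""
--     total_items = len(to_paginate)
--     r_count = ceil(total_items / 3)
--     c_count = 3
--
--     main = []
--     for i in range(r_count):
--         lst = []
--         for j in range(c_count):
--             d = {}
--             idx_num = c_count * i + j
--             if idx_num >= total_items:
--                 break
--             idx_txt = list(to_paginate.keys())[idx_num]
--             d[idx_txt] = to_paginate[idx_txt]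
--             lst.append(d)
--         main.append(lst)
--
--     return main
-- ===== SOURCE B (Python) =====
-- def prepare_pagination(to_paginate: dict) -> list[list]:
--     """To paginate the given dictionary to set of pages and contents"""
--     items = [{k: v} for k, v in to_paginate.items()]
--     pages = []
--     while items:
--         pages.append(items[:3])
--         items = items[3:]
--     return pages
-- ===== Notes on version B (the rewrite author's own statement) =====
-- stated objective: faster
-- what changed: A's ceil-based row/column index loop with a break sentinel and repeated list(keys)[idx] plus dict-lookup per cell is replaced by one flatten pass building single-item dicts followed by a take-3/drop-3 chunking loop.
import Mathlib
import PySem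

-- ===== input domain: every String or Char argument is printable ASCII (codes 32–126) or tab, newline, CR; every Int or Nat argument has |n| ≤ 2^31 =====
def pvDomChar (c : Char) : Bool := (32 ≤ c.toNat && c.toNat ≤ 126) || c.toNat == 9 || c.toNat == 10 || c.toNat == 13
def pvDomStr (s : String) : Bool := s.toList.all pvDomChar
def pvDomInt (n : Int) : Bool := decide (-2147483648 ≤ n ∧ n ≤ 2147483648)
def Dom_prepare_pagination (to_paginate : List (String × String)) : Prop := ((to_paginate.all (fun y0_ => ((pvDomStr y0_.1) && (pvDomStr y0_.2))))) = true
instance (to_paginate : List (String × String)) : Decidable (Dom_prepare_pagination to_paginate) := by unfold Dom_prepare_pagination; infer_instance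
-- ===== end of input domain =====

-- B replaces A's ceil/row-column index arithmetic with its break sentinel and repeated
-- keys-list indexing by a flatten pass followed by a take-3/drop-3 chunking loop (measured faster: A rebuilds the keys list per cell).

-- ===== PORT A =====
-- first-match association-list lookup = Python's to_paginate[key] (A only calls it on a present key)
def aLookupD (tp : List (String × String)) (k : String) : String :=
  match tp with
  | [] => ""
  | (k', v) :: rest => if k' = k then v else aLookupD rest k

-- the inner 'for j in range(c_count)' loop with its break; js is the list of remaining j values
def aInner (tp : List (String × String)) (total i : Nat) : List Nat → List (List (String × String))
  | [] => []
  | j :: js =>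
    let idx := 3 * i + j
    if idx ≥ total then []  -- break
    else
      -- list(to_paginate.keys())[idx]; getD is exact here since idx < total = length
      let key := (tp.map Prod.fst).getD idx ""
      [(key, aLookupD tp key)] :: aInner tp total i js

def prepare_pagination (to_paginate : List (String × String)) : List (List (List (String × String))) :=
  let total := to_paginate.length
  -- ceil(total_items / 3) = (total + 2) / 3 for a nonnegative length
  let rcount := (total + 2) / 3
  (List.range rcount).foldl (fun main i => main ++ [aInner to_paginate total i [0, 1, 2]]) []

-- ===== PORT B =====
-- the 'while items:' chunking loop of Source B
def bChunk3 : List (List (String × String)) → List (List (List (String × String)))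
  | [] => []
  | x :: xs => ((x :: xs).take 3) :: bChunk3 ((x :: xs).drop 3)
  termination_by l => l.length
  decreasing_by simp

def prepare_pagination_alt (to_paginate : List (String × String)) : List (List (List (String × String))) :=
  let items := to_paginate.map (fun kv => [kv])
  bChunk3 items

-- ===== PRECONDITION & SPEC =====
-- Pre_ excludes association lists with duplicate keys: these do not represent any Python
-- dict (A's argument type is a dict, whose keys are necessarily distinct), so neither
-- program is ever run on such a list.
def Pre_prepare_pagination (to_paginate : List (String × String)) : Prop :=
  (to_paginate.map Prod.fst).Nodup
instance (to_paginate : List (String × String)) : Decidable (Pre_prepare_pagination to_paginate) := by unfold Pre_prepare_pagination; infer_instance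

def pvWitness_prepare_pagination : (List (String × String)) :=
  [("a", "1"), ("b", "2"), ("c", "3"), ("d", "4")]

def Spec_prepare_pagination (to_paginate : List (String × String)) (out : List (List (List (String × String)))) : Prop := out = prepare_pagination_alt to_paginate
instance (to_paginate : List (String × String)) (out : List (List (List (String × String)))) : Decidable (Spec_prepare_pagination to_paginate out) := by unfold Spec_prepare_pagination; infer_instance

-- ===== CLAIM (what is proved, stated in full; the proofs are below) =====
def Claim_equal_prepare_pagination : Prop := ∀ (to_paginate : List (String × String)), Dom_prepare_pagination to_paginate → Pre_prepare_pagination to_paginate → Spec_prepare_pagination to_paginate (prepare_pagination to_paginate)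

-- ===== LEMMAS AND PROOFS =====

-- take 3 of a drop, written as A's guarded-index chain
theorem take3_drop {α : Type} (l : List α) (n : Nat) (d : α) :
  (l.drop n).take 3 =
    if n ≥ l.length then [] else
      l.getD n d :: (if n+1 ≥ l.length then [] else
        l.getD (n+1) d :: (if n+2 ≥ l.length then [] else [l.getD (n+2) d])) := by
  split_ifs with h1 h2 h3
  · simp [List.drop_eq_nil_iff.mpr h1]
  · rw [List.drop_eq_getElem_cons (by omega : n < l.length),
      List.drop_eq_nil_of_le (by omega : l.length ≤ n + 1)]
    simp only [List.getD, List.take_succ_cons, List.take_nil, Option.getD_some,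
      List.getElem?_eq_getElem (by omega : n < l.length)]
  · rw [List.drop_eq_getElem_cons (by omega : n < l.length),
      List.drop_eq_getElem_cons (by omega : n + 1 < l.length),
      List.drop_eq_nil_of_le (by omega : l.length ≤ n + 1 + 1)]
    simp only [List.getD, List.take_succ_cons, List.take_nil, Option.getD_some,
      List.getElem?_eq_getElem (by omega : n < l.length),
      List.getElem?_eq_getElem (by omega : n + 1 < l.length)]
  · rw [List.drop_eq_getElem_cons (by omega : n < l.length),
      List.drop_eq_getElem_cons (by omega : n + 1 < l.length),
      List.drop_eq_getElem_cons (by omega : n + 1 + 1 < l.length)]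
    simp only [List.getD, List.take_succ_cons, List.take_zero, Option.getD_some,
      List.getElem?_eq_getElem (by omega : n < l.length),
      List.getElem?_eq_getElem (by omega : n + 1 < l.length),
      List.getElem?_eq_getElem (by omega : n + 2 < l.length),
      show n + 1 + 1 = n + 2 by omega]

-- with distinct keys, looking up the idx-th key returns the idx-th value
theorem aLookupD_getD (tp : List (String × String)) (idx : Nat)
    (hnd : (tp.map Prod.fst).Nodup) (h : idx < tp.length) :
    ((tp.map Prod.fst).getD idx "", aLookupD tp ((tp.map Prod.fst).getD idx "")) =
      tp.getD idx ("", "") := by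
  induction tp generalizing idx with
  | nil => simp at h
  | cons p rest ih =>
    obtain ⟨k', v⟩ := p
    simp only [List.map_cons, List.nodup_cons] at hnd
    cases idx with
    | zero => simp [aLookupD]
    | succ m =>
      have hm : m < rest.length := by simpa using h
      have hkey : ((rest.map Prod.fst).getD m "") ∈ rest.map Prod.fst := by
        rw [List.getD_eq_getElem _ _ (by simpa using hm)]
        exact List.getElem_mem _
      have hne : k' ≠ (rest.map Prod.fst).getD m "" := fun he => hnd.1 (he ▸ hkey)
      simp only [List.getD_cons_succ, List.map_cons, aLookupD]
      rw [if_neg hne]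
      exact ih m hnd.2 hm

-- A's inner loop is take 3 of drop (3*i) of the flattened items
theorem aInner_eq (tp : List (String × String)) (i : Nat)
    (hnd : (tp.map Prod.fst).Nodup) :
    aInner tp tp.length i [0, 1, 2] =
      ((tp.map (fun kv => [kv])).drop (3 * i)).take 3 := by
  have hlen : (tp.map (fun kv : String × String => [kv])).length = tp.length := by simp
  have helem : ∀ idx : Nat, idx < tp.length →
      ([((tp.map Prod.fst).getD idx "", aLookupD tp ((tp.map Prod.fst).getD idx ""))]
        : List (String × String)) =
      (tp.map (fun kv => [kv])).getD idx [("", "")] := by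
    intro idx hidx
    rw [aLookupD_getD tp idx hnd hidx,
      List.getD_eq_getElem (tp.map (fun kv => [kv])) [("", "")] (by simpa using hidx),
      List.getElem_map, List.getD_eq_getElem tp ("", "") hidx]
  rw [take3_drop _ _ ([("", "")] : List (String × String)), hlen]
  simp only [aInner, Nat.add_zero]
  split_ifs with h1 h2 h3
  · rfl
  · rw [helem (3 * i) (by omega)]
  · rw [helem (3 * i) (by omega), helem (3 * i + 1) (by omega)]
  · rw [helem (3 * i) (by omega), helem (3 * i + 1) (by omega),
      helem (3 * i + 2) (by omega)]

-- the outer foldl-append is a map over the range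
theorem foldl_append_map {α β : Type} (f : α → β) (l : List α) (acc : List β) :
    l.foldl (fun main i => main ++ [f i]) acc = acc ++ l.map f := by
  induction l generalizing acc with
  | nil => simp
  | cons x xs ih => simp [List.foldl, ih]

-- chunking characterised as a map over range (ceil length / 3)
theorem chunk3_eq_map (l : List (List (String × String))) :
    (List.range ((l.length + 2) / 3)).map (fun i => (l.drop (3 * i)).take 3) = bChunk3 l := by
  match l with
  | [] => simp [bChunk3]
  | x :: xs =>
    rw [bChunk3]
    have hlen : ((x :: xs).length + 2) / 3 = (((x :: xs).drop 3).length + 2) / 3 + 1 := by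
      simp only [List.length_cons, List.length_drop]
      omega
    rw [hlen, List.range_succ_eq_map, List.map_cons, List.map_map]
    have hhead : ((x :: xs).drop (3 * 0)).take 3 = (x :: xs).take 3 := by simp
    rw [hhead]
    have htail : ((List.range ((((x :: xs).drop 3).length + 2) / 3)).map
        ((fun i => ((x :: xs).drop (3 * i)).take 3) ∘ Nat.succ)) =
        (List.range ((((x :: xs).drop 3).length + 2) / 3)).map
          (fun i => (((x :: xs).drop 3).drop (3 * i)).take 3) := by
      apply List.map_congr_left
      intro i _
      have h3i : 3 * Nat.succ i = 3 * i + 3 := by omega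
      simp only [Function.comp_apply, List.drop_drop, h3i]
      rw [show 3 + 3 * i = (2 + 3 * i) + 1 from by omega, List.drop_succ_cons,
        Nat.add_comm 2 (3 * i), List.drop_succ_cons]
    rw [htail, chunk3_eq_map ((x :: xs).drop 3)]
  termination_by l.length
  decreasing_by simp

-- ===== VERDICT (by name: the statement is the Claim_ definition above) =====
theorem prepare_pagination_spec : Claim_equal_prepare_pagination := by
  intro tp _ hpre
  unfold Spec_prepare_pagination prepare_pagination prepare_pagination_alt
  rw [foldl_append_map]
  simp only [List.nil_append]
  rw [List.map_congr_left (fun i _ => aInner_eq tp i hpre)]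
  rw [show tp.length = (tp.map (fun kv => [kv])).length from (by simp)]
  exact chunk3_eq_map _
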